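-- pv_equiv track=rewrite | github.com/nareshdb/codechefSolutions | COOK102B_ADAMTR/answer.py | compareMatrix
-- ===== SOURCE A (Python) =====
-- import math
--
-- def compareMatrix(matrix, comparisonMatrix, matSize):
--
-- 	for j in range(0, int(math.ceil(float(matSize)/2.0))):
--
-- 		noInJthCircleInitialMatrix = {}
--
-- 		for l in range(j, matSize-j):
-- 			noInJthCircleInitialMatrix[matrix[j][l]] = True
-- 			noInJthCircleInitialMatrix[matrix[l][j]] = True
-- 			noInJthCircleInitialMatrix[matrix[l][matSize-1-j]] = True
-- 			noInJthCircleInitialMatrix[matrix[matSize-1-j][l]] = True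
--
-- 		for l in range(j, matSize-j):
-- 			if (not comparisonMatrix[j][l] in noInJthCircleInitialMatrix) or (not comparisonMatrix[l][j] in noInJthCircleInitialMatrix) or (not comparisonMatrix[l][matSize-1-j] in noInJthCircleInitialMatrix) or (not comparisonMatrix[matSize-1-j][l] in noInJthCircleInitialMatrix):
-- 				return False
-- 	return True
-- ===== SOURCE B (Python) =====
-- def compareMatrix(matrix, comparisonMatrix, matSize):
--     ringVals = {}
--     for i in range(matSize):
--         for j in range(matSize):
--             r = min(i, j, matSize - 1 - i, matSize - 1 - j)
--             ringVals.setdefault(r, set()).add(matrix[i][j])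
--     return all(comparisonMatrix[i][j] in ringVals[min(i, j, matSize - 1 - i, matSize - 1 - j)]
--                for i in range(matSize) for j in range(matSize))
-- ===== Notes on version B (the rewrite author's own statement) =====
-- stated objective: alternative
-- what changed: Replaces A's per-ring four-perimeter-strip accumulate-then-check loops by one flat scan that classifies every cell into its ring r = min(i,j,n-1-i,n-1-j) grouping matrix values into a dict of sets, followed by one membership pass over the cells.
import Mathlib
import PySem

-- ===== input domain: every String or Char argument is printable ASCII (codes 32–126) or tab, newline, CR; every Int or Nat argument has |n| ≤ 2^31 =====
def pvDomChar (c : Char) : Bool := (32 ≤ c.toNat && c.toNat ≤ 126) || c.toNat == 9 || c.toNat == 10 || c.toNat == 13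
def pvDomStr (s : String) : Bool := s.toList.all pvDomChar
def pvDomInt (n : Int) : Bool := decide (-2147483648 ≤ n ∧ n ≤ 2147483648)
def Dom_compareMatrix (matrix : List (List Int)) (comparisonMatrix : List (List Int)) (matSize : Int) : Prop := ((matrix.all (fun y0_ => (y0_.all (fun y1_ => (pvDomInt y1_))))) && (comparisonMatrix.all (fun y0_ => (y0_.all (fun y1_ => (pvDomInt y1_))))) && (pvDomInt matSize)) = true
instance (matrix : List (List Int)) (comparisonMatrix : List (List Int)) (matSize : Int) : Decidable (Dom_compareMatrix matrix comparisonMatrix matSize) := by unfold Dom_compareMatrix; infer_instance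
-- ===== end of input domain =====

-- B replaces A's four perimeter-indexed loops per ring by one flat scan classifying each
-- cell into its ring r = min(i,j,n-1-i,n-1-j) into a dict of sets, then one membership pass
-- (objective: alternative decomposition, same asymptotic cost).

-- ===== PORT A =====
-- shared indexing helper: matrix[i][j]; exact under Pre_ (indices are in range there)
def pvCell (m : List (List Int)) (i j : Int) : Int :=
  PySem.List.pyGetD (PySem.List.pyGetD m i []) j 0

-- int(math.ceil(float(n)/2.0)): exact for |n| ≤ 2^31 (the float quotient is exact), = ⌈n/2⌉ = (n+1) // 2
def pvCeilHalf (n : Int) : Int := PySem.Int.floordiv (n + 1) 2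

def compareMatrix (matrix : List (List Int)) (comparisonMatrix : List (List Int)) (matSize : Int) : Bool :=
  -- for j in rings: build dict of the ring's matrix values, then the check loop
  -- (the early `return False` of a loop of checks is the Boolean `all`)
  (PySem.List.pyRange 0 (pvCeilHalf matSize) 1).all (fun j =>
    let d : PySem.Dict Int Bool :=
      (PySem.List.pyRange j (matSize - j) 1).foldl
        (fun d l =>
          ((((d.insert (pvCell matrix j l) true).insert (pvCell matrix l j) true).insert
              (pvCell matrix l (matSize - 1 - j)) true).insert
            (pvCell matrix (matSize - 1 - j) l) true))
        PySem.Dict.empty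
    (PySem.List.pyRange j (matSize - j) 1).all (fun l =>
      d.contains (pvCell comparisonMatrix j l) &&
      (d.contains (pvCell comparisonMatrix l j) &&
       (d.contains (pvCell comparisonMatrix l (matSize - 1 - j)) &&
        d.contains (pvCell comparisonMatrix (matSize - 1 - j) l)))))

-- ===== PORT B =====
-- ring index of cell (i, j): min(i, j, n-1-i, n-1-j)
def pvRing (n i j : Int) : Int := min (min i j) (min (n - 1 - i) (n - 1 - j))

def compareMatrix_alt (matrix : List (List Int)) (comparisonMatrix : List (List Int)) (matSize : Int) : Bool :=
  -- one flat pass grouping matrix values by ring (setdefault(r, set()).add(x)),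
  -- then one all() over the cells (ringVals[r] is always present there; getD is exact)
  let ringVals : PySem.Dict Int (PySem.Set Int) :=
    (PySem.List.pyRange 0 matSize 1).foldl
      (fun d i =>
        (PySem.List.pyRange 0 matSize 1).foldl
          (fun d j =>
            let r := pvRing matSize i j
            d.insert r ((d.getD r PySem.Set.empty).add (pvCell matrix i j)))
          d)
      PySem.Dict.empty
  (PySem.List.pyRange 0 matSize 1).all (fun i =>
    (PySem.List.pyRange 0 matSize 1).all (fun j =>
      (ringVals.getD (pvRing matSize i j) PySem.Set.empty).contains (pvCell comparisonMatrix i j)))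

-- ===== PRECONDITION & SPEC =====
-- Pre_ excludes inputs where some of the first matSize rows of either matrix are missing or
-- shorter than matSize: there the Pythons raise IndexError — except that on part of them A's
-- early False return (its ring-by-ring reading order) lets it skip the malformed rows of
-- comparisonMatrix that B's row-major reading order still reaches (and vice versa), an
-- accident of reading order on malformed input.
def Pre_compareMatrix (matrix : List (List Int)) (comparisonMatrix : List (List Int)) (matSize : Int) : Prop :=
  0 < matSize →
    (matSize ≤ (matrix.length : Int) ∧ matSize ≤ (comparisonMatrix.length : Int) ∧
     (∀ row ∈ matrix.take matSize.toNat, matSize ≤ (row.length : Int)) ∧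
     (∀ row ∈ comparisonMatrix.take matSize.toNat, matSize ≤ (row.length : Int)))
instance (matrix : List (List Int)) (comparisonMatrix : List (List Int)) (matSize : Int) : Decidable (Pre_compareMatrix matrix comparisonMatrix matSize) := by unfold Pre_compareMatrix; infer_instance

def pvWitness_compareMatrix : List (List Int) × List (List Int) × Int :=
  ([[1, 2], [3, 4]], [[4, 3], [2, 1]], 2)

def Spec_compareMatrix (matrix : List (List Int)) (comparisonMatrix : List (List Int)) (matSize : Int) (out : Bool) : Prop := out = compareMatrix_alt matrix comparisonMatrix matSize
instance (matrix : List (List Int)) (comparisonMatrix : List (List Int)) (matSize : Int) (out : Bool) : Decidable (Spec_compareMatrix matrix comparisonMatrix matSize out) := by unfold Spec_compareMatrix; infer_instance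

-- ===== CLAIM (what is proved, stated in full; the proofs are below) =====
def Claim_equal_compareMatrix : Prop := ∀ (matrix : List (List Int)) (comparisonMatrix : List (List Int)) (matSize : Int), Dom_compareMatrix matrix comparisonMatrix matSize → Pre_compareMatrix matrix comparisonMatrix matSize → Spec_compareMatrix matrix comparisonMatrix matSize (compareMatrix matrix comparisonMatrix matSize)

-- ===== LEMMAS AND PROOFS =====

-- `pvGood m n v r`: v occurs in matrix m on ring r of the n×n board
def pvGood (m : List (List Int)) (n v r : Int) : Prop :=
  ∃ i k, 0 ≤ i ∧ i < n ∧ 0 ≤ k ∧ k < n ∧ pvRing n i k = r ∧ pvCell m i k = v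

-- geometry: inside the board, having ring index j = lying on one of the four strips of ring j
theorem pvGeom (n j i k : Int) (hj0 : 0 ≤ j) (hjn : 2 * j + 1 ≤ n)
    (hi0 : 0 ≤ i) (hin : i < n) (hk0 : 0 ≤ k) (hkn : k < n) :
    pvRing n i k = j ↔
      ((i = j ∧ j ≤ k ∧ k < n - j) ∨ (k = j ∧ j ≤ i ∧ i < n - j) ∨
       (k = n - 1 - j ∧ j ≤ i ∧ i < n - j) ∨ (i = n - 1 - j ∧ j ≤ k ∧ k < n - j)) := by
  unfold pvRing; omega

theorem pvRing_bounds (n i k : Int) (hi0 : 0 ≤ i) (hin : i < n) (hk0 : 0 ≤ k) (hkn : k < n) :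
    0 ≤ pvRing n i k ∧ 2 * pvRing n i k + 1 ≤ n := by
  unfold pvRing; omega

theorem pvCeilHalf_lt (n j : Int) : j < pvCeilHalf n ↔ 2 * j + 1 ≤ n := by
  unfold pvCeilHalf
  rw [PySem.Int.floordiv_eq_ediv_of_pos (by omega)]
  omega

-- A's dict: membership = being a value of the four strips of ring j
theorem pvDictA (m : List (List Int)) (n j : Int) (xs : List Int) (d : PySem.Dict Int Bool) (v : Int) :
    ((xs.foldl
      (fun d l =>
        ((((d.insert (pvCell m j l) true).insert (pvCell m l j) true).insert
            (pvCell m l (n - 1 - j)) true).insert (pvCell m (n - 1 - j) l) true)) d).contains v = true)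
    ↔ (d.contains v = true ∨
       ∃ l ∈ xs, v = pvCell m j l ∨ v = pvCell m l j ∨
                 v = pvCell m l (n - 1 - j) ∨ v = pvCell m (n - 1 - j) l) := by
  induction xs generalizing d with
  | nil => simp
  | cons x t ih =>
    simp only [List.foldl_cons, ih, PySem.Dict.contains_insert, List.mem_cons,
      Bool.or_eq_true, beq_iff_eq]
    constructor
    · rintro (h | h)
      · rcases h with h | h | h | h | h
        · exact Or.inr ⟨x, Or.inl rfl, Or.inr (Or.inr (Or.inr h))⟩
        · exact Or.inr ⟨x, Or.inl rfl, Or.inr (Or.inr (Or.inl h))⟩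
        · exact Or.inr ⟨x, Or.inl rfl, Or.inr (Or.inl h)⟩
        · exact Or.inr ⟨x, Or.inl rfl, Or.inl h⟩
        · exact Or.inl h
      · obtain ⟨l, hl, hv⟩ := h
        exact Or.inr ⟨l, Or.inr hl, hv⟩
    · rintro (h | ⟨l, rfl | hl, hv⟩)
      · exact Or.inl (Or.inr (Or.inr (Or.inr (Or.inr h))))
      · rcases hv with h | h | h | h
        · exact Or.inl (Or.inr (Or.inr (Or.inr (Or.inl h))))
        · exact Or.inl (Or.inr (Or.inr (Or.inl h)))
        · exact Or.inl (Or.inr (Or.inl h))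
        · exact Or.inl (Or.inl h)
      · exact Or.inr ⟨l, hl, hv⟩

-- B's grouping fold, inner loop (one row of cells)
theorem pvFoldRow (m : List (List Int)) (n i : Int) (js : List Int)
    (d : PySem.Dict Int (PySem.Set Int)) (r v : Int) :
    v ∈ (js.foldl
          (fun d j => d.insert (pvRing n i j) ((d.getD (pvRing n i j) PySem.Set.empty).add (pvCell m i j))) d).getD r PySem.Set.empty
    ↔ v ∈ d.getD r PySem.Set.empty ∨ ∃ j ∈ js, pvRing n i j = r ∧ pvCell m i j = v := by
  induction js generalizing d with
  | nil => simp
  | cons x t ih =>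
    simp only [List.foldl_cons, ih, PySem.Dict.getD_insert, List.mem_cons]
    by_cases hr : r = pvRing n i x
    · subst hr
      simp only [if_true, PySem.Set.mem_add]
      constructor
      · rintro ((h | h) | h)
        · exact Or.inl h
        · exact Or.inr ⟨x, Or.inl rfl, rfl, h.symm⟩
        · obtain ⟨j, hj, h⟩ := h; exact Or.inr ⟨j, Or.inr hj, h⟩
      · rintro (h | ⟨j, rfl | hj, hr, hv⟩)
        · exact Or.inl (Or.inl h)
        · exact Or.inl (Or.inr hv.symm)
        · exact Or.inr ⟨j, hj, hr, hv⟩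
    · rw [if_neg hr]
      constructor
      · rintro (h | ⟨j, hj, h⟩)
        · exact Or.inl h
        · exact Or.inr ⟨j, Or.inr hj, h⟩
      · rintro (h | ⟨j, rfl | hj, hrr, hv⟩)
        · exact Or.inl h
        · exact absurd hrr.symm hr
        · exact Or.inr ⟨j, hj, hrr, hv⟩

-- B's grouping fold, outer loop
theorem pvFoldB (m : List (List Int)) (n : Int) (is js : List Int)
    (d : PySem.Dict Int (PySem.Set Int)) (r v : Int) :
    v ∈ (is.foldl
          (fun d i => js.foldl
            (fun d j => d.insert (pvRing n i j) ((d.getD (pvRing n i j) PySem.Set.empty).add (pvCell m i j))) d) d).getD r PySem.Set.empty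
    ↔ v ∈ d.getD r PySem.Set.empty ∨ ∃ i ∈ is, ∃ j ∈ js, pvRing n i j = r ∧ pvCell m i j = v := by
  induction is generalizing d with
  | nil => simp
  | cons x t ih =>
    simp only [List.foldl_cons, ih, pvFoldRow, List.mem_cons]
    constructor
    · rintro ((h | ⟨j, hj, h1, h2⟩) | ⟨i, hi, j, hj, h1, h2⟩)
      · exact Or.inl h
      · exact Or.inr ⟨x, Or.inl rfl, j, hj, h1, h2⟩
      · exact Or.inr ⟨i, Or.inr hi, j, hj, h1, h2⟩
    · rintro (h | ⟨i, rfl | hi, j, hj, h1, h2⟩)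
      · exact Or.inl (Or.inl h)
      · exact Or.inl (Or.inr ⟨j, hj, h1, h2⟩)
      · exact Or.inr ⟨i, hi, j, hj, h1, h2⟩

-- the four strips of ring j carry exactly the values lying on ring j
theorem pvStrip (m : List (List Int)) (n j v : Int) (hj0 : 0 ≤ j) (hjn : 2 * j + 1 ≤ n) :
    (∃ l, (j ≤ l ∧ l < n - j) ∧
      (v = pvCell m j l ∨ v = pvCell m l j ∨ v = pvCell m l (n - 1 - j) ∨ v = pvCell m (n - 1 - j) l))
    ↔ pvGood m n v j := by
  constructor
  · rintro ⟨l, ⟨hl1, hl2⟩, h | h | h | h⟩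
    · exact ⟨j, l, by omega, by omega, by omega, by omega,
        (pvGeom n j j l hj0 hjn (by omega) (by omega) (by omega) (by omega)).mpr
          (Or.inl ⟨rfl, hl1, hl2⟩), h.symm⟩
    · exact ⟨l, j, by omega, by omega, by omega, by omega,
        (pvGeom n j l j hj0 hjn (by omega) (by omega) (by omega) (by omega)).mpr
          (Or.inr (Or.inl ⟨rfl, hl1, hl2⟩)), h.symm⟩
    · exact ⟨l, n - 1 - j, by omega, by omega, by omega, by omega,
        (pvGeom n j l (n - 1 - j) hj0 hjn (by omega) (by omega) (by omega) (by omega)).mpr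
          (Or.inr (Or.inr (Or.inl ⟨rfl, hl1, hl2⟩))), h.symm⟩
    · exact ⟨n - 1 - j, l, by omega, by omega, by omega, by omega,
        (pvGeom n j (n - 1 - j) l hj0 hjn (by omega) (by omega) (by omega) (by omega)).mpr
          (Or.inr (Or.inr (Or.inr ⟨rfl, hl1, hl2⟩))), h.symm⟩
  · rintro ⟨i, k, hi0, hin, hk0, hkn, hr, rfl⟩
    rcases (pvGeom n j i k hj0 hjn hi0 hin hk0 hkn).mp hr with
      ⟨rfl, h1, h2⟩ | ⟨rfl, h1, h2⟩ | ⟨rfl, h1, h2⟩ | ⟨rfl, h1, h2⟩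
    · exact ⟨k, ⟨h1, h2⟩, Or.inl rfl⟩
    · exact ⟨i, ⟨h1, h2⟩, Or.inr (Or.inl rfl)⟩
    · exact ⟨i, ⟨h1, h2⟩, Or.inr (Or.inr (Or.inl rfl))⟩
    · exact ⟨k, ⟨h1, h2⟩, Or.inr (Or.inr (Or.inr rfl))⟩

-- common mathematical form of both programs
def pvCommon (m c : List (List Int)) (n : Int) : Prop :=
  ∀ i k, 0 ≤ i → i < n → 0 ≤ k → k < n → pvGood m n (pvCell c i k) (pvRing n i k)

theorem pvA_iff (m c : List (List Int)) (n : Int) :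
    compareMatrix m c n = true ↔ pvCommon m c n := by
  unfold compareMatrix
  simp only [List.all_eq_true, PySem.List.mem_pyRange_one, Bool.and_eq_true, pvDictA,
    PySem.Dict.contains_empty, Bool.false_eq_true, false_or, pvCeilHalf_lt]
  constructor
  · intro h i k hi0 hin hk0 hkn
    obtain ⟨hr0, hrn⟩ := pvRing_bounds n i k hi0 hin hk0 hkn
    have hgeom := (pvGeom n (pvRing n i k) i k hr0 hrn hi0 hin hk0 hkn).mp rfl
    generalize hR : pvRing n i k = r at hr0 hrn hgeom ⊢
    rcases hgeom with ⟨he, h1, h2⟩ | ⟨he, h1, h2⟩ | ⟨he, h1, h2⟩ | ⟨he, h1, h2⟩ <;> rw [he]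
    · have := (h r ⟨hr0, hrn⟩ k ⟨h1, h2⟩).1
      rwa [(pvStrip m n _ _ hr0 hrn)] at this
    · have := (h r ⟨hr0, hrn⟩ i ⟨h1, h2⟩).2.1
      rwa [(pvStrip m n _ _ hr0 hrn)] at this
    · have := (h r ⟨hr0, hrn⟩ i ⟨h1, h2⟩).2.2.1
      rwa [(pvStrip m n _ _ hr0 hrn)] at this
    · have := (h r ⟨hr0, hrn⟩ k ⟨h1, h2⟩).2.2.2
      rwa [(pvStrip m n _ _ hr0 hrn)] at this
  · intro h j hj l hl
    obtain ⟨hj0, hjn⟩ := hj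
    obtain ⟨hl1, hl2⟩ := hl
    refine ⟨?_, ?_, ?_, ?_⟩ <;> rw [pvStrip m n _ _ hj0 hjn]
    · have := h j l hj0 (by omega) (by omega) (by omega)
      rwa [(pvGeom n j j l hj0 hjn (by omega) (by omega) (by omega) (by omega)).mpr
        (Or.inl ⟨rfl, hl1, hl2⟩)] at this
    · have := h l j (by omega) (by omega) hj0 (by omega)
      rwa [(pvGeom n j l j hj0 hjn (by omega) (by omega) (by omega) (by omega)).mpr
        (Or.inr (Or.inl ⟨rfl, hl1, hl2⟩))] at this
    · have := h l (n - 1 - j) (by omega) (by omega) (by omega) (by omega)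
      rwa [(pvGeom n j l (n - 1 - j) hj0 hjn (by omega) (by omega) (by omega) (by omega)).mpr
        (Or.inr (Or.inr (Or.inl ⟨rfl, hl1, hl2⟩)))] at this
    · have := h (n - 1 - j) l (by omega) (by omega) (by omega) (by omega)
      rwa [(pvGeom n j (n - 1 - j) l hj0 hjn (by omega) (by omega) (by omega) (by omega)).mpr
        (Or.inr (Or.inr (Or.inr ⟨rfl, hl1, hl2⟩)))] at this

theorem pvB_iff (m c : List (List Int)) (n : Int) :
    compareMatrix_alt m c n = true ↔ pvCommon m c n := by
  unfold compareMatrix_alt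
  simp only [List.all_eq_true, PySem.List.mem_pyRange_one, PySem.Set.contains_iff, pvFoldB]
  simp only [PySem.Dict.getD, PySem.Dict.get?, PySem.Dict.empty, PySem.Set.empty,
    List.not_mem_nil, false_or, List.find?_nil, Option.map_none, Option.getD_none]
  constructor
  · intro h i k hi0 hin hk0 hkn
    obtain ⟨i', hi', k', hk', hr, hv⟩ := h i ⟨hi0, hin⟩ k ⟨hk0, hkn⟩
    exact ⟨i', k', hi'.1, hi'.2, hk'.1, hk'.2, hr, hv⟩
  · intro h i hi k hk
    obtain ⟨i', k', h1, h2, h3, h4, hr, hv⟩ := h i k hi.1 hi.2 hk.1 hk.2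
    exact ⟨i', ⟨h1, h2⟩, k', ⟨h3, h4⟩, hr, hv⟩

-- ===== VERDICT (by name: the statement is the Claim_ definition above) =====
theorem compareMatrix_spec : Claim_equal_compareMatrix := by
  intro m c n _ _
  unfold Spec_compareMatrix
  rw [Bool.eq_iff_iff, pvA_iff, pvB_iff]
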